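-- pv_equiv track=rewrite | github.com/state-alchemists/zrb | src/zrb/util/truncate.py | _remove_lines_from_head
-- ===== SOURCE A (Python) =====
-- def _remove_lines_from_head(
--     kept_lines: list[str],
--     head_lines: int,
--     tail_lines: int,
--     current_size_with_msg: int,
--     max_chars: int,
-- ) -> tuple[list[str], int, int]:
--     """Remove lines from head section (from bottom of head) if content still too large.
--
--     Returns:
--         tuple: (kept_lines, lines_removed_from_head, new_current_size_with_msg)
--     """
--     lines_removed_from_head = 0
--     if current_size_with_msg <= max_chars or head_lines <= 0:
--         return kept_lines, lines_removed_from_head, current_size_with_msg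
--
--     head_section = kept_lines[:head_lines] if head_lines > 0 else []
--     tail_section = kept_lines[-tail_lines:] if tail_lines > 0 else []
--
--     while len(head_section) > 0 and current_size_with_msg > max_chars:
--         # Remove last line of head section (closest to tail)
--         head_section.pop()
--         lines_removed_from_head += 1
--
--         # Update kept lines and recalculate size
--         kept_lines = head_section + tail_section
--         current_content = "".join(kept_lines)
--         current_size_with_msg = len(current_content)
--         # Add truncation message estimate if any lines were removed
--         if lines_removed_from_head > 0:
--             current_size_with_msg += 35  # TRUNCATION_MSG_ESTIMATE
--
--     return kept_lines, lines_removed_from_head, current_size_with_msg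
-- ===== SOURCE B (Python) =====
-- def _remove_lines_from_head(
--     kept_lines: list[str],
--     head_lines: int,
--     tail_lines: int,
--     current_size_with_msg: int,
--     max_chars: int,
-- ) -> tuple[list[str], int, int]:
--     """Remove lines from head section (from bottom of head) if content still too large.
--
--     One reverse pass with a running size (prefix-sum decrement) instead of
--     re-joining the whole content after every pop.
--     """
--     if current_size_with_msg <= max_chars or head_lines <= 0:
--         return kept_lines, 0, current_size_with_msg
--
--     head_section = kept_lines[:head_lines]
--     tail_section = kept_lines[-tail_lines:] if tail_lines > 0 else []
--     if not head_section:
--         return kept_lines, 0, current_size_with_msg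
--
--     tail_size = sum(len(s) for s in tail_section)
--     rem = sum(len(s) for s in head_section)  # chars still kept from the head
--     removed = 0
--     for line in reversed(head_section):
--         rem -= len(line)
--         removed += 1
--         if rem + tail_size + 35 <= max_chars:  # 35 = TRUNCATION_MSG_ESTIMATE
--             break
--     new_size = rem + tail_size + 35
--     return head_section[: len(head_section) - removed] + tail_section, removed, new_size
-- ===== Notes on version B (the rewrite author's own statement) =====
-- stated objective: alternative
-- what changed: Instead of rebuilding and re-joining the whole kept content after every pop, B computes the head and tail sizes once and walks the head lines in reverse with a running size decrement; same cost on the measured inputs.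
import Mathlib
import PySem

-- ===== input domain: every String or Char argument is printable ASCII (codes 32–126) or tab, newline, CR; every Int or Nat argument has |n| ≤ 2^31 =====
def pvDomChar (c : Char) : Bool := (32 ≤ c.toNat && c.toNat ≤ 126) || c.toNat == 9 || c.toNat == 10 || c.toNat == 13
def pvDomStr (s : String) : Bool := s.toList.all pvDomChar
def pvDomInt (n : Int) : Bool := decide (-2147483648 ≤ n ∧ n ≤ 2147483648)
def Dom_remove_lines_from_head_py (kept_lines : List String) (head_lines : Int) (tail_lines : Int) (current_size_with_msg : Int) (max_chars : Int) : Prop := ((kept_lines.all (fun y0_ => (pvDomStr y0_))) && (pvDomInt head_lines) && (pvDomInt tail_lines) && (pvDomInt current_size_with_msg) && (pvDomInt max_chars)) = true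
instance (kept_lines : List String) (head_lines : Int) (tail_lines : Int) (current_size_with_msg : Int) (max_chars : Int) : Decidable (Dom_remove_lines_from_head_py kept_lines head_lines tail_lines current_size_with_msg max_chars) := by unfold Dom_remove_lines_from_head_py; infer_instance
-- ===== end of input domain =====

-- ===== PORT A =====
-- B replaces A's per-pop re-join of the whole content by one reverse pass with a running size; equivalence of return values proved (A also rebinds its local kept_lines, not caller-visible).

-- the while-loop of A: pop the last head line, rebuild kept_lines and re-measure it, until it fits
def pvALoop (tail_section : List String) (max_chars : Int) (kept_lines head_section : List String) (lines_removed_from_head current_size_with_msg : Int) : List String × Int × Int :=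
  if h : 0 < PySem.List.len head_section ∧ current_size_with_msg > max_chars then
    let head' := head_section.dropLast
    let removed' := lines_removed_from_head + 1
    let kept' := head' ++ tail_section
    let current_content := PySem.Str.join "" kept'
    let size' := PySem.Str.len current_content + (if removed' > 0 then 35 else 0)
    pvALoop tail_section max_chars kept' head' removed' size'
  else (kept_lines, lines_removed_from_head, current_size_with_msg)
termination_by head_section.length
decreasing_by
  simp only [PySem.List.len_eq] at h
  have : head_section ≠ [] := by
    intro he; rw [he] at h; simp at h
  simp [List.length_dropLast]
  omega

def remove_lines_from_head_py (kept_lines : List String) (head_lines : Int) (tail_lines : Int) (current_size_with_msg : Int) (max_chars : Int) : List String × Int × Int :=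
  if current_size_with_msg ≤ max_chars ∨ head_lines ≤ 0 then
    (kept_lines, 0, current_size_with_msg)
  else
    let head_section := if head_lines > 0 then PySem.List.slice kept_lines none (some head_lines) else []
    let tail_section := if tail_lines > 0 then PySem.List.slice kept_lines (some (-tail_lines)) none else []
    pvALoop tail_section max_chars kept_lines head_section 0 current_size_with_msg

-- ===== PORT B =====
-- sum(len(s) for s in l)
def pvSumLens (l : List String) : Int := (l.map PySem.Str.len).sum

-- B's for-loop over reversed(head_section) with break: running size decrement
def pvBLoop (tail_size max_chars : Int) : List String → Int → Int → Int × Int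
  | [], rem, removed => (rem, removed)
  | line :: rest, rem, removed =>
    let rem' := rem - PySem.Str.len line
    let removed' := removed + 1
    if rem' + tail_size + 35 ≤ max_chars then (rem', removed')
    else pvBLoop tail_size max_chars rest rem' removed'

def remove_lines_from_head_py_alt (kept_lines : List String) (head_lines : Int) (tail_lines : Int) (current_size_with_msg : Int) (max_chars : Int) : List String × Int × Int :=
  if current_size_with_msg ≤ max_chars ∨ head_lines ≤ 0 then
    (kept_lines, 0, current_size_with_msg)
  else
    let head_section := PySem.List.slice kept_lines none (some head_lines)
    let tail_section := if tail_lines > 0 then PySem.List.slice kept_lines (some (-tail_lines)) none else []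
    if head_section = [] then (kept_lines, 0, current_size_with_msg)
    else
      let tail_size := pvSumLens tail_section
      let p := pvBLoop tail_size max_chars head_section.reverse (pvSumLens head_section) 0
      let new_size := p.1 + tail_size + 35
      (PySem.List.slice head_section none (some (PySem.List.len head_section - p.2)) ++ tail_section, p.2, new_size)

-- ===== PRECONDITION & SPEC =====
def Spec_remove_lines_from_head_py (kept_lines : List String) (head_lines : Int) (tail_lines : Int) (current_size_with_msg : Int) (max_chars : Int) (out : List String × Int × Int) : Prop := out = remove_lines_from_head_py_alt kept_lines head_lines tail_lines current_size_with_msg max_chars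
instance (kept_lines : List String) (head_lines : Int) (tail_lines : Int) (current_size_with_msg : Int) (max_chars : Int) (out : List String × Int × Int) : Decidable (Spec_remove_lines_from_head_py kept_lines head_lines tail_lines current_size_with_msg max_chars out) := by unfold Spec_remove_lines_from_head_py; infer_instance

-- ===== CLAIM (what is proved, stated in full; the proofs are below) =====
def Claim_equal_remove_lines_from_head_py : Prop := ∀ (kept_lines : List String) (head_lines : Int) (tail_lines : Int) (current_size_with_msg : Int) (max_chars : Int), Dom_remove_lines_from_head_py kept_lines head_lines tail_lines current_size_with_msg max_chars → Spec_remove_lines_from_head_py kept_lines head_lines tail_lines current_size_with_msg max_chars (remove_lines_from_head_py kept_lines head_lines tail_lines current_size_with_msg max_chars)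

-- ===== LEMMAS AND PROOFS =====

-- length of the separator-free join at the char-list level
lemma pv_chars_join_len : ∀ css : List (List Char), (PySem.Chars.join [] css).length = (css.map List.length).sum
  | [] => by simp [PySem.Chars.join_nil]
  | [a] => by simp [PySem.Chars.join_singleton]
  | a :: b :: r => by
    rw [PySem.Chars.join_cons_cons]
    have := pv_chars_join_len (b :: r)
    simp only [List.append_nil, List.length_append, List.map_cons, List.sum_cons] at *
    omega

-- len("".join(l)) is the sum of the line lengths
lemma pv_join_len (l : List String) : PySem.Str.len (PySem.Str.join "" l) = pvSumLens l := by
  simp only [PySem.Str.len, PySem.Str.join, pvSumLens]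
  rw [String.toList_ofList, show "".toList = ([] : List Char) from rfl, pv_chars_join_len]
  induction l with
  | nil => simp
  | cons a rest ih =>
    simp only [List.map_cons, List.sum_cons, PySem.Str.len] at *
    push_cast at *
    omega

lemma pvSumLens_append (a b : List String) : pvSumLens (a ++ b) = pvSumLens a + pvSumLens b := by
  simp [pvSumLens]

-- the removed-counter of B's loop is a pure offset
lemma pvBLoop_shift (ts mc : Int) (g : List String) : ∀ rem r,
    pvBLoop ts mc g rem r = ((pvBLoop ts mc g rem 0).1, r + (pvBLoop ts mc g rem 0).2) := by
  induction g with
  | nil => intro rem r; simp [pvBLoop]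
  | cons line rest ih =>
    intro rem r
    simp only [pvBLoop]
    split_ifs with hc
    · simp
    · rw [ih _ (r + 1), ih _ (0 + 1)]
      simp only [Prod.mk.injEq]
      refine ⟨?_, ?_⟩ <;> first | trivial | omega

lemma pvBLoop_bounds' (ts mc : Int) : ∀ (g : List String) (rem r : Int),
    r ≤ (pvBLoop ts mc g rem r).2 ∧ (pvBLoop ts mc g rem r).2 ≤ r + (g.length : Int) := by
  intro g
  induction g with
  | nil => intro rem r; simp [pvBLoop]
  | cons line rest ih =>
    intro rem r
    simp only [pvBLoop]
    split_ifs with hc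
    · simp only [List.length_cons]
      push_cast
      omega
    · have := ih (rem - PySem.Str.len line) (r + 1)
      simp only [List.length_cons] at *
      push_cast at *
      omega

lemma pvBLoop_bounds (ts mc : Int) (g : List String) : ∀ rem,
    0 ≤ (pvBLoop ts mc g rem 0).2 ∧ (pvBLoop ts mc g rem 0).2 ≤ (g.length : Int) := by
  intro rem
  have := pvBLoop_bounds' ts mc g rem 0
  omega

-- main correspondence between A's pop loop and B's reverse scan (head written as g.reverse)
lemma pv_main (tail : List String) (mc : Int) : ∀ (g : List String), g ≠ [] →
    ∀ (kept : List String) (removed size : Int), 0 ≤ removed → size > mc →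
    pvALoop tail mc kept g.reverse removed size =
      ((g.reverse).take (g.length - (pvBLoop (pvSumLens tail) mc g (pvSumLens g.reverse) 0).2.toNat) ++ tail,
       removed + (pvBLoop (pvSumLens tail) mc g (pvSumLens g.reverse) 0).2,
       (pvBLoop (pvSumLens tail) mc g (pvSumLens g.reverse) 0).1 + pvSumLens tail + 35) := by
  intro g
  induction g with
  | nil => intro h; exact absurd rfl h
  | cons line rest ih =>
    intro _ kept removed size hrem hsz
    rw [pvALoop]
    have hrev : (line :: rest).reverse = rest.reverse ++ [line] := by simp
    have hlen : 0 < PySem.List.len ((line :: rest).reverse) := by simp [PySem.List.len_eq]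
    rw [dif_pos ⟨hlen, hsz⟩]
    dsimp only
    have hdl : ((line :: rest).reverse).dropLast = rest.reverse := by rw [hrev]; simp
    rw [hdl]
    have hpos : removed + 1 > 0 := by omega
    rw [if_pos hpos, pv_join_len, pvSumLens_append]
    have hrem0 : pvSumLens ((line :: rest).reverse) = pvSumLens rest.reverse + PySem.Str.len line := by
      rw [hrev, pvSumLens_append]; simp [pvSumLens]
    have hb : pvBLoop (pvSumLens tail) mc (line :: rest) (pvSumLens ((line :: rest).reverse)) 0
        = (if pvSumLens rest.reverse + pvSumLens tail + 35 ≤ mc then (pvSumLens rest.reverse, 1)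
           else pvBLoop (pvSumLens tail) mc rest (pvSumLens rest.reverse) 1) := by
      simp only [pvBLoop, hrem0, add_sub_cancel_right, zero_add]
    by_cases hc : pvSumLens rest.reverse + pvSumLens tail + 35 ≤ mc
    · -- the pop we just did made the content fit: both sides stop after this removal
      rw [pvALoop, dif_neg (fun hcon => absurd hcon.2 (by omega)), hb, if_pos hc]
      simp only [hrev, List.length_cons, Int.toNat_one, Nat.add_sub_cancel, Prod.mk.injEq, and_true]
      rw [show rest.length = rest.reverse.length by simp, List.take_left]
    · cases rest with
      | nil =>
        -- head is exhausted: both sides stop with everything removed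
        rw [pvALoop, dif_neg (by simp [PySem.List.len_eq]), hb, if_neg hc]
        simp [pvBLoop, pvSumLens]
      | cons b r =>
        have ihh := ih (by simp) ((b :: r).reverse ++ tail) (removed + 1)
          (pvSumLens (b :: r).reverse + pvSumLens tail + 35) (by omega) (by omega)
        rw [ihh, hb, if_neg hc, pvBLoop_shift (pvSumLens tail) mc (b :: r) (pvSumLens (b :: r).reverse) 1]
        dsimp only
        have hbd := pvBLoop_bounds (pvSumLens tail) mc (b :: r) (pvSumLens (b :: r).reverse)
        set q := pvBLoop (pvSumLens tail) mc (b :: r) (pvSumLens (b :: r).reverse) 0 with hq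
        simp only [Prod.mk.injEq]
        refine ⟨?_, by omega, trivial⟩
        rw [hrev]
        have h1 : (1 + q.2).toNat = 1 + q.2.toNat := by omega
        rw [h1]
        have h2 : (line :: b :: r).length - (1 + q.2.toNat) = (b :: r).length - q.2.toNat := by
          simp only [List.length_cons]; omega
        rw [h2, List.take_append_of_le_length (by simp only [List.length_reverse]; omega)]

-- ===== VERDICT (by name: the statement is the Claim_ definition above) =====
theorem remove_lines_from_head_py_spec : Claim_equal_remove_lines_from_head_py := by
  intro kl hl tl cs mc _
  show remove_lines_from_head_py kl hl tl cs mc = remove_lines_from_head_py_alt kl hl tl cs mc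
  unfold remove_lines_from_head_py remove_lines_from_head_py_alt
  by_cases h1 : cs ≤ mc ∨ hl ≤ 0
  · simp [h1]
  · rw [if_neg h1, if_neg h1]
    push Not at h1
    rw [if_pos (by omega : hl > 0)]
    set head := PySem.List.slice kl none (some hl) with hh
    set tail := if tl > 0 then PySem.List.slice kl (some (-tl)) none else ([] : List String) with ht
    by_cases h2 : head = []
    · rw [if_pos h2, h2, pvALoop, dif_neg (by simp [PySem.List.len_eq])]
    · rw [if_neg h2]
      dsimp only
      have hmain := pv_main tail mc head.reverse (by simpa using h2) kl 0 cs (le_refl 0) (by omega)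
      rw [List.reverse_reverse] at hmain
      rw [hmain]
      have hbd := pvBLoop_bounds (pvSumLens tail) mc head.reverse (pvSumLens head)
      set p := pvBLoop (pvSumLens tail) mc head.reverse (pvSumLens head) 0 with hp
      have h4 := hbd.1
      have h5 := hbd.2
      simp only [List.length_reverse] at h5
      have htake : PySem.List.slice head none (some (PySem.List.len head - p.2))
          = List.take (head.reverse.length - p.2.toNat) head := by
        rw [PySem.List.slice_to head (by simp only [PySem.List.len_eq]; omega)]
        congr 1
        simp only [PySem.List.len_eq, List.length_reverse]
        omega
      rw [htake, zero_add]
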